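-- pv_equiv track=rewrite | github.com/zhusq20/reasoning-evals | arc_agi/playpen/test_answers/first.py | transform
-- ===== SOURCE A (Python) =====
-- def transform(grid: list[list[int]]) -> list[list[int]]:
--     rows, cols = len(grid), len(grid[0])
--
--     def is_square(r, c, size):
--         if r + size > rows or c + size > cols:
--             return False
--         return all(
--             grid[i][j] == 3 for i in range(r, r + size) for j in range(c, c + size)
--         )
--
--     def find_largest_square(r, c):
--         size = 1
--         while is_square(r, c, size + 1):
--             size += 1
--         return size
--
--     def fill_square(r, c, size):
--         for i in range(r + 1, r + size - 1):
--             for j in range(c + 1, c + size - 1):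
--                 grid[i][j] = 4
--
--     for r in range(rows):
--         for c in range(cols):
--             if grid[r][c] == 3:
--                 size = find_largest_square(r, c)
--                 if size >= 2:
--                     fill_square(r, c, size)
--
--     return grid
-- ===== SOURCE B (Python) =====
-- def transform(grid: list[list[int]]) -> list[list[int]]:
--     rows, cols = len(grid), len(grid[0])
--     for r in range(rows):
--         for c in range(cols):
--             if grid[r][c] != 3:
--                 continue
--             # row-run algorithm: the largest all-3 square at (r, c) is the
--             # largest s with s <= min of the 3-run lengths of its first s rows.
--             # Grow s one row at a time, keeping m = the running minimum of the
--             # runs seen so far (each run is only measured up to m).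
--             m = min(rows - r, cols - c)
--             s = 0
--             while s < m:
--                 row = grid[r + s]
--                 run = 0
--                 while run < m and row[c + run] == 3:
--                     run += 1
--                 if run <= s:
--                     break
--                 if run < m:
--                     m = run
--                 s += 1
--             size = s
--             if size >= 2:
--                 seg = [4] * (size - 2)
--                 for i in range(r + 1, r + size - 1):
--                     grid[i][c + 1:c + size - 1] = seg
--     return grid
-- ===== Notes on version B (the rewrite author's own statement) =====
-- stated objective: alternative
-- what changed: A re-scans the whole candidate square at every growth step of a grow-while loop; B computes each square's side with a row-run algorithm (the side is the largest s fitting under the running minimum of the 3-run lengths of its rows) and fills interiors by slice assignment.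
import Mathlib
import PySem

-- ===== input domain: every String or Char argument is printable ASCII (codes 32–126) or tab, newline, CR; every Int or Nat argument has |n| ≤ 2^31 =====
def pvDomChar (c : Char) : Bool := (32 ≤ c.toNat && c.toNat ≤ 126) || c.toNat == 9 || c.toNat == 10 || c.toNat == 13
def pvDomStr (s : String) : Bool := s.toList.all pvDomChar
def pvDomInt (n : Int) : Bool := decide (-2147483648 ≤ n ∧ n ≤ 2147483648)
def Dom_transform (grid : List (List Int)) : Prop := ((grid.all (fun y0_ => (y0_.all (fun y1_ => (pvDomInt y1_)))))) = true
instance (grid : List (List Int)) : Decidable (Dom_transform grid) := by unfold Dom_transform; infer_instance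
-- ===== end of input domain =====

-- B replaces A's rescan-the-whole-square growth by a row-run algorithm (the square side is
-- the largest s that fits under the running minimum of the 3-run lengths of its rows) and
-- fills interiors by slice assignment; both Pythons mutate the argument grid in place the
-- same way, and the equivalence proved here is about the returned value.

-- grid[i][j] read; every read reached under Pre_ is in range, so the default is never the value used
def pvGet2 (g : List (List Int)) (i j : Nat) : Int := (g.getD i []).getD j 0

-- ===== PORT A =====
-- grid[i][j] = v
def pvSet2 (g : List (List Int)) (i j : Nat) (v : Int) : List (List Int) :=
  g.modify i (fun row => row.set j v)

-- is_square(r, c, size)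
def aIsSquare (g : List (List Int)) (rows cols r c size : Nat) : Bool :=
  if decide (r + size > rows) || decide (c + size > cols) then false
  else (List.range' r size).all (fun i => (List.range' c size).all (fun j => pvGet2 g i j == 3))

-- the while loop of find_largest_square; fuel = rows suffices: the condition forces
-- r + size + 1 ≤ rows, so the loop stops before the fuel can run out.
def aFindGo (g : List (List Int)) (rows cols r c : Nat) : Nat → Nat → Nat
  | 0, size => size
  | fuel + 1, size =>
    if aIsSquare g rows cols r c (size + 1) then aFindGo g rows cols r c fuel (size + 1) else size

def aFind (g : List (List Int)) (rows cols r c : Nat) : Nat :=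
  aFindGo g rows cols r c rows 1

-- fill_square: range(r+1, r+size-1) has size-2 elements (fill is only reached with size ≥ 2)
def aFill (g : List (List Int)) (r c size : Nat) : List (List Int) :=
  (List.range' (r + 1) (size - 2)).foldl (fun g i =>
    (List.range' (c + 1) (size - 2)).foldl (fun g j => pvSet2 g i j 4) g) g

def transform (grid : List (List Int)) : List (List Int) :=
  let rows := grid.length
  let cols := (grid.headD []).length   -- len(grid[0]); Python raises on [] (excluded by Pre_)
  (List.range rows).foldl (fun g r =>
    (List.range cols).foldl (fun g c =>
      if pvGet2 g r c == 3 then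
        let size := aFind g rows cols r c
        if 2 ≤ size then aFill g r c size else g
      else g) g) grid

-- ===== PORT B =====
-- inner while of B: the 3-run of `row` starting at column c, measured up to the cap m;
-- fuel = m suffices: run strictly increases and the loop stops once run = m.
def bRunGo (row : List Int) (c m : Nat) : Nat → Nat → Nat
  | 0, run => run
  | fuel + 1, run =>
    if decide (run < m) && (row.getD (c + run) 0 == 3) then bRunGo row c m fuel (run + 1) else run

-- outer while of B: grow s row by row under the running minimum m of the runs;
-- fuel = the initial m suffices: s strictly increases and the loop stops once s = m ≤ initial m.
def bSizeGo (g : List (List Int)) (r c : Nat) : Nat → Nat → Nat → Nat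
  | 0, _, s => s
  | fuel + 1, m, s =>
    if s < m then
      let run := bRunGo (g.getD (r + s) []) c m m 0
      if run ≤ s then s
      else bSizeGo g r c fuel (min m run) (s + 1)
    else s

-- row[c+1 : c+size-1] = [4] * (size-2)  (Python slice assignment; take/drop clip exactly as slices do)
def bFillRow (row : List Int) (c size : Nat) : List Int :=
  row.take (c + 1) ++ List.replicate (size - 2) 4 ++ row.drop (c + size - 1)

-- the fill loop: i runs over range(r+1, r+size-1), i.e. size-2 rows starting at r+1
def bFillGo (c size : Nat) : Nat → Nat → List (List Int) → List (List Int)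
  | _, 0, g => g
  | i, k + 1, g => bFillGo c size (i + 1) k (g.modify i (fun row => bFillRow row c size))

-- body of B's double loop at one cell (r, c)
def bStep (rows cols r c : Nat) (g : List (List Int)) : List (List Int) :=
  if pvGet2 g r c == 3 then
    let m0 := min (rows - r) (cols - c)
    let size := bSizeGo g r c m0 m0 0
    if 2 ≤ size then bFillGo c size (r + 1) (size - 2) g else g
  else g

def bColsGo (rows cols r : Nat) : Nat → Nat → List (List Int) → List (List Int)
  | _, 0, g => g
  | c, k + 1, g => bColsGo rows cols r (c + 1) k (bStep rows cols r c g)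

def bRowsGo (rows cols : Nat) : Nat → Nat → List (List Int) → List (List Int)
  | _, 0, g => g
  | r, k + 1, g => bRowsGo rows cols (r + 1) k (bColsGo rows cols r 0 cols g)

def transform_alt (grid : List (List Int)) : List (List Int) :=
  let rows := grid.length
  let cols := (grid.headD []).length
  bRowsGo rows cols 0 rows grid

-- ===== PRECONDITION & SPEC =====
-- Pre_ excludes the empty grid (A raises IndexError on grid[0]) and grids with a row shorter
-- than the first row: there A always raises IndexError, since grid[r][c] is read for every
-- c < len(grid[0]) (rows longer than the first are fine: no access ever goes past that length).
def Pre_transform (grid : List (List Int)) : Prop :=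
  grid ≠ [] ∧ ∀ row ∈ grid, (grid.headD []).length ≤ row.length
instance (grid : List (List Int)) : Decidable (Pre_transform grid) := by
  unfold Pre_transform; infer_instance

def pvWitness_transform : List (List Int) := [[3, 3, 0], [3, 3, 1], [0, 1, 2]]

def Spec_transform (grid : List (List Int)) (out : List (List Int)) : Prop := out = transform_alt grid
instance (grid : List (List Int)) (out : List (List Int)) : Decidable (Spec_transform grid out) := by unfold Spec_transform; infer_instance

-- ===== CLAIM (what is proved, stated in full; the proofs are below) =====
def Claim_equal_transform : Prop := ∀ (grid : List (List Int)), Dom_transform grid → Pre_transform grid → Spec_transform grid (transform grid)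

-- ===== LEMMAS AND PROOFS =====

-- characterization of A's is_square
lemma pvSqIff (g : List (List Int)) (rows cols r c t : Nat) :
    aIsSquare g rows cols r c t = true ↔
      (r + t ≤ rows ∧ c + t ≤ cols ∧
        ∀ i j, i < t → j < t → (pvGet2 g (r + i) (c + j) == 3) = true) := by
  unfold aIsSquare
  by_cases hb : (decide (r + t > rows) || decide (c + t > cols)) = true
  · rw [if_pos hb]
    simp only [Bool.or_eq_true, decide_eq_true_eq] at hb
    constructor
    · intro h; exact absurd h (by simp)
    · intro h; omega
  · rw [if_neg hb]
    simp only [Bool.or_eq_true, decide_eq_true_eq, not_or] at hb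
    simp only [List.all_eq_true, List.mem_range'_1]
    constructor
    · intro h
      refine ⟨by omega, by omega, ?_⟩
      intro i j hi hj
      exact h (r + i) ⟨by omega, by omega⟩ (c + j) ⟨by omega, by omega⟩
    · rintro ⟨-, -, h⟩ i ⟨hi1, hi2⟩ j ⟨hj1, hj2⟩
      have hi' : i = r + (i - r) := by omega
      have hj' : j = c + (j - c) := by omega
      rw [hi', hj']
      exact h (i - r) (j - c) (by omega) (by omega)

-- aIsSquare is downward closed in the size
lemma pvSqDown (g : List (List Int)) (rows cols r c : Nat) :
    ∀ t u, u ≤ t → aIsSquare g rows cols r c t = true → aIsSquare g rows cols r c u = true := by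
  intro t u hut ht
  rw [pvSqIff] at ht ⊢
  obtain ⟨h1, h2, h3⟩ := ht
  exact ⟨by omega, by omega, fun i j hi hj => h3 i j (by omega) (by omega)⟩

-- cells of an all-3 square
lemma pvSqCell (g : List (List Int)) (rows cols r c t : Nat)
    (h : aIsSquare g rows cols r c t = true) :
    ∀ i j, i < t → j < t → (pvGet2 g (r + i) (c + j) == 3) = true :=
  ((pvSqIff g rows cols r c t).mp h).2.2

lemma pvSqBounds (g : List (List Int)) (rows cols r c t : Nat)
    (h : aIsSquare g rows cols r c t = true) : r + t ≤ rows ∧ c + t ≤ cols :=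
  ⟨((pvSqIff g rows cols r c t).mp h).1, ((pvSqIff g rows cols r c t).mp h).2.1⟩

lemma pvSqUnique (g : List (List Int)) (rows cols r c s₁ s₂ : Nat)
    (h₁ : aIsSquare g rows cols r c s₁ = true) (h₁' : aIsSquare g rows cols r c (s₁+1) = false)
    (h₂ : aIsSquare g rows cols r c s₂ = true) (h₂' : aIsSquare g rows cols r c (s₂+1) = false) :
    s₁ = s₂ := by
  rcases Nat.lt_trichotomy s₁ s₂ with h | h | h
  · exact absurd (pvSqDown g rows cols r c s₂ (s₁ + 1) h h₂) (by simp [h₁'])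
  · exact h
  · exact absurd (pvSqDown g rows cols r c s₁ (s₂ + 1) h h₁) (by simp [h₂'])

-- A's while loop reaches the maximal square size
lemma pvFindChar (g : List (List Int)) (rows cols r c : Nat) :
    ∀ fuel size, 1 ≤ size → aIsSquare g rows cols r c size = true →
      rows + 1 ≤ size + fuel →
      aIsSquare g rows cols r c (aFindGo g rows cols r c fuel size) = true ∧
      aIsSquare g rows cols r c (aFindGo g rows cols r c fuel size + 1) = false := by
  intro fuel
  induction fuel with
  | zero =>
    intro size h1 hs hfuel
    have := (pvSqBounds g rows cols r c size hs).1
    omega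
  | succ n ih =>
    intro size h1 hs hfuel
    simp only [aFindGo]
    by_cases hnext : aIsSquare g rows cols r c (size + 1) = true
    · rw [if_pos hnext]
      exact ih (size + 1) (by omega) hnext (by omega)
    · rw [if_neg hnext]
      exact ⟨hs, by simpa using hnext⟩

-- B's run loop: its result q satisfies run ≤ q ≤ m, all cells before q are 3,
-- and if q < m the cell at q is not 3
lemma pvRunChar (row : List Int) (c m : Nat) :
    ∀ fuel run, run ≤ m → m ≤ run + fuel →
      (∀ k, k < run → (row.getD (c + k) 0 == 3) = true) →
      run ≤ bRunGo row c m fuel run ∧ bRunGo row c m fuel run ≤ m ∧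
      (∀ k, k < bRunGo row c m fuel run → (row.getD (c + k) 0 == 3) = true) ∧
      (bRunGo row c m fuel run < m → (row.getD (c + bRunGo row c m fuel run) 0 == 3) = false) := by
  intro fuel
  induction fuel with
  | zero =>
    intro run h1 h2 h3
    simp only [bRunGo]
    exact ⟨le_refl _, h1, h3, by omega⟩
  | succ n ih =>
    intro run h1 h2 h3
    simp only [bRunGo]
    by_cases hcond : (decide (run < m) && (row.getD (c + run) 0 == 3)) = true
    · rw [if_pos hcond]
      simp only [Bool.and_eq_true, decide_eq_true_eq] at hcond
      have step := ih (run + 1) (by omega) (by omega) (by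
        intro k hk
        by_cases hkr : k < run
        · exact h3 k hkr
        · have : k = run := by omega
          rw [this]; exact hcond.2)
      exact ⟨by omega, step.2.1, step.2.2.1, step.2.2.2⟩
    · rw [if_neg hcond]
      simp only [Bool.and_eq_true, decide_eq_true_eq, not_and] at hcond
      refine ⟨le_refl _, h1, h3, ?_⟩
      intro hlt
      simpa using hcond hlt

-- B's size loop reaches the maximal square size
lemma pvSizeChar (g : List (List Int)) (rows cols r c : Nat) (hr : r ≤ rows) (hc : c ≤ cols) :
    ∀ fuel m s, s ≤ m → m ≤ s + fuel → m ≤ rows - r → m ≤ cols - c →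
      (∀ i j, i < s → j < m → (pvGet2 g (r + i) (c + j) == 3) = true) →
      (∀ t, m < t → aIsSquare g rows cols r c t = false) →
      aIsSquare g rows cols r c (bSizeGo g r c fuel m s) = true ∧
      aIsSquare g rows cols r c (bSizeGo g r c fuel m s + 1) = false := by
  intro fuel
  induction fuel with
  | zero =>
    intro m s hsm hfuel hmr hmc hinv habove
    simp only [bSizeGo]
    have hsmeq : s = m := by omega
    subst hsmeq
    refine ⟨(pvSqIff g rows cols r c s).mpr ⟨by omega, by omega, fun i j hi hj => hinv i j hi hj⟩, ?_⟩
    exact habove (s + 1) (by omega)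
  | succ n ih =>
    intro m s hsm hfuel hmr hmc hinv habove
    simp only [bSizeGo]
    by_cases hlt : s < m
    · rw [if_pos hlt]
      have hrc := pvRunChar (g.getD (r + s) []) c m m 0 (by omega) (by omega) (by omega)
      set run := bRunGo (g.getD (r + s) []) c m m 0 with hrun
      obtain ⟨-, hrm, hcells, hstop⟩ := hrc
      -- reads through the row are reads of the grid
      have hget : ∀ k, (g.getD (r + s) []).getD (c + k) 0 = pvGet2 g (r + s) (c + k) := by
        intro k; rfl
      by_cases hbr : run ≤ s
      · rw [if_pos hbr]
        refine ⟨(pvSqIff g rows cols r c s).mpr ⟨by omega, by omega, fun i j hi hj => hinv i j hi (by omega)⟩, ?_⟩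
        -- the (s+1)-square would contain the non-3 cell (r+s, c+run)
        rw [← Bool.not_eq_true]
        intro hsq
        have := pvSqCell g rows cols r c (s + 1) hsq s run (by omega) (by omega)
        rw [← hget run] at this
        rw [hstop (by omega)] at this
        exact absurd this (by simp)
      · rw [if_neg hbr]
        have hsrun : s < run := by omega
        refine ih (min m run) (s + 1) (by omega) (by omega) (by omega) (by omega) ?_ ?_
        · intro i j hi hj
          by_cases his : i < s
          · exact hinv i j his (by omega)
          · have : i = s := by omega
            subst this
            rw [← hget j]
            exact hcells j (by omega)
        · intro t ht
          by_cases htm : m < t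
          · exact habove t htm
          · -- min m run < t ≤ m forces run < m, so cell (r+s, c+run) is not 3 but lies in the t-square
            have hrunm : run < m := by omega
            rw [← Bool.not_eq_true]
            intro hsq
            have := pvSqCell g rows cols r c t hsq s run (by omega) (by omega)
            rw [← hget run] at this
            rw [hstop hrunm] at this
            exact absurd this (by simp)
    · rw [if_neg hlt]
      have hsmeq : s = m := by omega
      subst hsmeq
      refine ⟨(pvSqIff g rows cols r c s).mpr ⟨by omega, by omega, fun i j hi hj => hinv i j hi hj⟩, ?_⟩
      exact habove (s + 1) (by omega)

-- the two size computations agree at a 3-cell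
lemma pvSizeEq (g : List (List Int)) (rows cols r c : Nat) (hr : r < rows) (hc : c < cols)
    (h3 : (pvGet2 g r c == 3) = true) :
    aFind g rows cols r c = bSizeGo g r c (min (rows - r) (cols - c)) (min (rows - r) (cols - c)) 0 := by
  have h1 : aIsSquare g rows cols r c 1 = true := by
    refine (pvSqIff g rows cols r c 1).mpr ⟨by omega, by omega, ?_⟩
    intro i j hi hj
    have hi0 : i = 0 := by omega
    have hj0 : j = 0 := by omega
    subst hi0; subst hj0
    simpa using h3
  have hA := pvFindChar g rows cols r c rows 1 (le_refl _) h1 (by omega)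
  have hB := pvSizeChar g rows cols r c (by omega) (by omega)
      (min (rows - r) (cols - c)) (min (rows - r) (cols - c)) 0
      (by omega) (by omega) (by omega) (by omega) (by omega)
      (by
        intro t ht
        rw [← Bool.not_eq_true]
        intro hsq
        have := pvSqBounds g rows cols r c t hsq
        omega)
  exact pvSqUnique g rows cols r c _ _ hA.1 hA.2 hB.1 hB.2

-- folding two functions that agree on states satisfying an invariant preserved by the first
lemma pvFoldlRel {α β : Type} (P : α → Prop) (f₁ f₂ : α → β → α) :
    ∀ (l : List β) (a : α), P a → (∀ a b, b ∈ l → P a → f₁ a b = f₂ a b ∧ P (f₁ a b)) →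
      l.foldl f₁ a = l.foldl f₂ a ∧ P (l.foldl f₁ a) := by
  intro l
  induction l with
  | nil => intro a hP _; exact ⟨rfl, hP⟩
  | cons b t ih =>
    intro a hP h
    obtain ⟨heq, hP'⟩ := h a b (by simp) hP
    simp only [List.foldl_cons, ← heq]
    exact ih _ hP' (fun a b hb => h a b (by simp [hb]))

lemma pvModifyModify {α : Type} (l : List α) (i : Nat) (f h : α → α) :
    (l.modify i f).modify i h = l.modify i (fun x => h (f x)) := by
  apply List.ext_getElem
  · simp [List.length_modify]
  · intro k h1 h2
    simp only [List.getElem_modify]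
    split_ifs <;> rfl

lemma pvModifyCongr {α : Type} (l : List α) (i : Nat) (f h : α → α)
    (hfh : ∀ hi : i < l.length, f l[i] = h l[i]) :
    l.modify i f = l.modify i h := by
  apply List.ext_getElem
  · simp [List.length_modify]
  · intro k h1 h2
    simp only [List.getElem_modify]
    split_ifs with hik
    · subst hik; exact hfh (by simpa using h1)
    · rfl

lemma pvFoldlModify {β : Type} (i : Nat) (f : List Int → β → List Int) :
    ∀ (l : List β) (g : List (List Int)),
      l.foldl (fun g b => g.modify i (fun row => f row b)) g
        = g.modify i (fun row => l.foldl f row) := by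
  intro l
  induction l with
  | nil =>
    intro g
    simp only [List.foldl_nil]
    apply List.ext_getElem
    · simp [List.length_modify]
    · intro k h1 h2
      rw [List.getElem_modify]
      split_ifs <;> rfl
  | cons b t ih =>
    intro g
    simp only [List.foldl_cons, ih, pvModifyModify]

lemma pvFoldlSetLen : ∀ (l : List Nat) (row : List Int),
    (l.foldl (fun row j => row.set j (4 : Int)) row).length = row.length := by
  intro l
  induction l with
  | nil => intro row; rfl
  | cons b t ih => intro row; simp [List.foldl_cons, ih]

lemma pvFoldlSetGet : ∀ (n s : Nat) (row : List Int) (k : Nat) (hk : k < row.length),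
    ((List.range' s n).foldl (fun row j => row.set j (4 : Int)) row)[k]'(by rw [pvFoldlSetLen]; exact hk)
      = if s ≤ k ∧ k < s + n then 4 else row[k] := by
  intro n
  induction n with
  | zero =>
    intro s row k hk
    rw [if_neg (by omega)]
    rfl
  | succ m ih =>
    intro s row k hk
    simp only [List.range'_succ, List.foldl_cons]
    refine (ih (s + 1) (row.set s 4) k (by simpa using hk)).trans ?_
    simp only [List.getElem_set]
    split_ifs <;> first | rfl | omega

lemma pvRowFill (n s : Nat) (row : List Int) (hlen : s + n ≤ row.length) :
    (List.range' s n).foldl (fun row j => row.set j (4 : Int)) row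
      = row.take s ++ List.replicate n 4 ++ row.drop (s + n) := by
  apply List.ext_getElem
  · simp [pvFoldlSetLen]; omega
  · intro k h1 h2
    have hk : k < row.length := by rwa [pvFoldlSetLen] at h1
    rw [pvFoldlSetGet n s row k hk]
    simp only [List.getElem_append, List.getElem_take, List.getElem_replicate, List.getElem_drop,
      List.length_append, List.length_take, List.length_replicate]
    have hmin : min s row.length = s := by omega
    simp only [hmin]
    by_cases hin : s ≤ k ∧ k < s + n
    · rw [if_pos hin, dif_pos (by omega), dif_neg (by omega)]
    · rw [if_neg hin]
      by_cases hks : k < s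
      · rw [dif_pos (by omega), dif_pos hks]
      · rw [dif_neg (by omega)]
        have hidx : s + n + (k - (s + n)) = k := by omega
        simp only [hidx]

lemma pvPModify (g : List (List Int)) (i : Nat) (F : List Int → List Int) (cols : Nat)
    (hP : ∀ row ∈ g, cols ≤ row.length)
    (hF : ∀ row, cols ≤ row.length → cols ≤ (F row).length) :
    ∀ row ∈ g.modify i F, cols ≤ row.length := by
  intro row hrow
  rw [List.mem_iff_getElem] at hrow
  obtain ⟨k, hk, rfl⟩ := hrow
  rw [List.getElem_modify]
  split_ifs
  · exact hF _ (hP _ (List.getElem_mem (by simpa using hk)))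
  · exact hP _ (List.getElem_mem (by simpa using hk))

-- B's recursions unfolded to folds over ranges
lemma pvFillGoFold (c size : Nat) :
    ∀ k i g, bFillGo c size i k g
      = (List.range' i k).foldl (fun g i => g.modify i (fun row => bFillRow row c size)) g := by
  intro k
  induction k with
  | zero => intro i g; rfl
  | succ n ih =>
    intro i g
    simp only [bFillGo, List.range'_succ, List.foldl_cons, ih]

lemma pvColsGoFold (rows cols r : Nat) :
    ∀ k c g, bColsGo rows cols r c k g
      = (List.range' c k).foldl (fun g c => bStep rows cols r c g) g := by
  intro k
  induction k with
  | zero => intro c g; rfl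
  | succ n ih =>
    intro c g
    simp only [bColsGo, List.range'_succ, List.foldl_cons, ih]

lemma pvRowsGoFold (rows cols : Nat) :
    ∀ k r g, bRowsGo rows cols r k g
      = (List.range' r k).foldl (fun g r => bColsGo rows cols r 0 cols g) g := by
  intro k
  induction k with
  | zero => intro r g; rfl
  | succ n ih =>
    intro r g
    simp only [bRowsGo, List.range'_succ, List.foldl_cons, ih]

-- ===== VERDICT (by name: the statement is the Claim_ definition above) =====
theorem transform_spec : Claim_equal_transform := by
  intro grid _ hpre
  unfold Spec_transform transform transform_alt
  rw [pvRowsGoFold, ← List.range_eq_range']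
  refine (pvFoldlRel (fun g => ∀ row ∈ g, (grid.headD []).length ≤ row.length) _ _
    (List.range grid.length) grid hpre.2 ?_).1
  intro g r hr hP
  have hrlt : r < grid.length := List.mem_range.mp hr
  rw [pvColsGoFold, ← List.range_eq_range']
  refine pvFoldlRel (fun g => ∀ row ∈ g, (grid.headD []).length ≤ row.length) _ _
    (List.range (grid.headD []).length) g hP ?_
  intro g c hc hP
  have hclt : c < (grid.headD []).length := List.mem_range.mp hc
  unfold bStep
  by_cases h3 : (pvGet2 g r c == 3) = true
  · simp only [h3, if_true]
    rw [← pvSizeEq g grid.length (grid.headD []).length r c hrlt hclt h3]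
    set size := aFind g grid.length (grid.headD []).length r c with hsz
    by_cases h2 : 2 ≤ size
    · simp only [h2, if_true]
      -- the found size really is an all-3 square, giving c + size ≤ cols
      have h1 : aIsSquare g grid.length (grid.headD []).length r c 1 = true := by
        refine (pvSqIff g grid.length (grid.headD []).length r c 1).mpr ⟨by omega, by omega, ?_⟩
        intro i j hi hj
        have hi0 : i = 0 := by omega
        have hj0 : j = 0 := by omega
        subst hi0; subst hj0
        simpa using h3
      have hsq : aIsSquare g grid.length (grid.headD []).length r c size = true :=
        (pvFindChar g grid.length (grid.headD []).length r c grid.length 1 (le_refl _) h1 (by omega)).1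
      have hcb : c + size ≤ (grid.headD []).length :=
        (pvSqBounds g grid.length (grid.headD []).length r c size hsq).2
      unfold aFill
      rw [pvFillGoFold]
      refine pvFoldlRel (fun g => ∀ row ∈ g, (grid.headD []).length ≤ row.length) _ _
        (List.range' (r + 1) (size - 2)) g hP ?_
      intro g i _ hP
      constructor
      · unfold pvSet2
        rw [pvFoldlModify i (fun row j => row.set j 4) (List.range' (c + 1) (size - 2)) g]
        apply pvModifyCongr
        intro hi
        have hrow : (grid.headD []).length ≤ g[i].length := hP _ (List.getElem_mem hi)
        rw [pvRowFill (size - 2) (c + 1) g[i] (by omega)]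
        unfold bFillRow
        have : c + 1 + (size - 2) = c + size - 1 := by omega
        rw [this]
      · unfold pvSet2
        rw [pvFoldlModify i (fun row j => row.set j 4) (List.range' (c + 1) (size - 2)) g]
        apply pvPModify _ _ _ _ hP
        intro row hrow
        rw [pvFoldlSetLen]; exact hrow
    · simp only [h2, if_false]
      exact ⟨trivial, hP⟩
  · simp only [Bool.not_eq_true] at h3
    simp only [h3, Bool.false_eq_true, if_false]
    exact ⟨trivial, hP⟩
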